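-- pv_equiv track=rewrite | github.com/kiraskywing/Code_Practice | CodeSignal/russia-bricks.py | convert
-- ===== SOURCE A (Python) =====
-- def convert(arr, offset):
--     res = []
--     for row in arr:
--         num = 0
--         for d in row:
--             num = num * 2 + d
--         res.append(num << offset)
--     return res
-- ===== SOURCE B (Python) =====
-- def _value(row, place):
--     # scan the row right-to-left, keeping a running total and the current place value
--     total = 0
--     for d in reversed(row):
--         total += d * place
--         place *= 2
--     return total
--
-- def convert(arr, offset):
--     # the offset is folded into the initial place value, so no final shift is needed
--     return [_value(row, 1 << offset) for row in arr]
-- ===== Notes on version B (the rewrite author's own statement) =====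
-- stated objective: alternative
-- what changed: Replaces the append loop with Horner's left-to-right accumulator and a final shift by a per-row helper that scans each row right-to-left with a running (total, place) pair whose initial place already incorporates the offset, mapped over the rows; no shift is performed.
import Mathlib
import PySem

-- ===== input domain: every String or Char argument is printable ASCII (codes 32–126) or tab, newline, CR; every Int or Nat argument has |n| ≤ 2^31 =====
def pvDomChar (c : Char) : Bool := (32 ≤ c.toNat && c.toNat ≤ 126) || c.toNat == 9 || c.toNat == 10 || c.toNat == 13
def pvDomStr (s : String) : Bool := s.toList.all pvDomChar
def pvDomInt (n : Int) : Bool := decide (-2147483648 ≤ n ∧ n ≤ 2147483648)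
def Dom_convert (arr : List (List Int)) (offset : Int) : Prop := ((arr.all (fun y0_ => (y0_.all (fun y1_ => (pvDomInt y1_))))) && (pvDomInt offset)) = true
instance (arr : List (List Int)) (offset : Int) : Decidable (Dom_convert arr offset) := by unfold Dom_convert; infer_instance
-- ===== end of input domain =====

-- B replaces A's append loop with Horner's accumulator and a final shift by mapping a
-- per-row helper that scans each row right-to-left with a running (total, place) pair
-- starting at place = 1 << offset (objective: alternative).


-- ===== PORT A =====
def convert (arr : List (List Int)) (offset : Int) : List Int :=
  arr.foldl (fun res row =>
    res ++ [((row.foldl (fun num d => num * 2 + d) (0 : Int) : Int)) <<< offset.toNat]) []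

-- ===== PORT B =====
-- Source B's helper _value: state (total, place) over the reversed row
def pvValue (row : List Int) (place : Int) : Int :=
  (row.reverse.foldl (fun s d => (s.1 + d * s.2, s.2 * 2)) ((0 : Int), place)).1

def convert_alt (arr : List (List Int)) (offset : Int) : List Int :=
  arr.map (fun row => pvValue row ((1 : Int) <<< offset.toNat))

-- ===== PRECONDITION & SPEC =====
-- Pre_ excludes negative offsets, on which Python's '<<' raises ValueError in both A and B.
def Pre_convert (arr : List (List Int)) (offset : Int) : Prop := 0 ≤ offset
instance (arr : List (List Int)) (offset : Int) : Decidable (Pre_convert arr offset) := by unfold Pre_convert; infer_instance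
def pvWitness_convert : List (List Int) × Int := ([[1, 0, 1], [1, 1]], 2)
def Spec_convert (arr : List (List Int)) (offset : Int) (out : List Int) : Prop := out = convert_alt arr offset
instance (arr : List (List Int)) (offset : Int) (out : List Int) : Decidable (Spec_convert arr offset out) := by unfold Spec_convert; infer_instance

-- ===== CLAIM (what is proved, stated in full; the proofs are below) =====
def Claim_equal_convert : Prop := ∀ (arr : List (List Int)) (offset : Int), Dom_convert arr offset → Pre_convert arr offset → Spec_convert arr offset (convert arr offset)

-- ===== LEMMAS AND PROOFS =====

-- the (total, place) fold factors: total = t + p * (value at place 1), place scales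
theorem pvLoop_factor (l : List Int) (t p : Int) :
    l.foldl (fun s d => (s.1 + d * s.2, s.2 * 2)) (t, p)
      = (t + p * (l.foldl (fun s d => (s.1 + d * s.2, s.2 * 2)) ((0 : Int), (1 : Int))).1,
         p * 2 ^ l.length) := by
  induction l generalizing t p with
  | nil => simp
  | cons d l ih =>
    simp only [List.foldl_cons, List.length_cons]
    rw [ih, ih (0 + d * 1) (1 * 2)]
    refine Prod.ext ?_ ?_ <;> (dsimp; ring)

-- Horner over row equals the reversed weighted sum
theorem horner_eq_rev (row : List Int) :
    row.foldl (fun num d => num * 2 + d) (0 : Int)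
      = (row.reverse.foldl (fun s d => (s.1 + d * s.2, s.2 * 2)) ((0 : Int), (1 : Int))).1 := by
  induction row using List.reverseRecOn with
  | nil => simp
  | append_singleton row d ih =>
    rw [List.foldl_append, List.reverse_append]
    simp only [List.reverse_cons, List.reverse_nil, List.nil_append, List.foldl_cons,
      List.foldl_nil, List.foldl_append]
    rw [pvLoop_factor, ← ih]
    dsimp
    ring

theorem pvValue_eq (row : List Int) (p : Int) :
    pvValue row p = p * row.foldl (fun num d => num * 2 + d) (0 : Int) := by
  unfold pvValue
  rw [pvLoop_factor, horner_eq_rev]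
  dsimp
  ring

theorem convert_foldl_map (arr : List (List Int)) (offset : Int) :
    convert arr offset = arr.map (fun row =>
      ((row.foldl (fun num d => num * 2 + d) (0 : Int) : Int)) <<< offset.toNat) := by
  unfold convert
  suffices h : ∀ (acc : List Int),
      arr.foldl (fun res row => res ++ [((row.foldl (fun num d => num * 2 + d) (0 : Int) : Int)) <<< offset.toNat]) acc
        = acc ++ arr.map (fun row => ((row.foldl (fun num d => num * 2 + d) (0 : Int) : Int)) <<< offset.toNat) by
    simpa using h []
  induction arr with
  | nil => intro acc; simp
  | cons r rs ih => intro acc; simp [ih]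

-- ===== VERDICT (by name: the statement is the Claim_ definition above) =====
theorem convert_spec : Claim_equal_convert := by
  intro arr offset _ _
  show convert arr offset = convert_alt arr offset
  rw [convert_foldl_map]
  unfold convert_alt
  refine List.map_congr_left fun row _ => ?_
  rw [pvValue_eq, Int.shiftLeft_eq, Int.shiftLeft_eq]
  ring
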